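-- pv_equiv track=rewrite | github.com/Elsa9999/CTDL-v-GT | python/bai5_5.py | solve_expression
-- ===== SOURCE A (Python) =====
-- def solve_expression(expression, sign_multiplier):
--     output_expression = ""
--     i = 0
--     while i < len(expression):
--         char_at_i = expression[i]
--         if char_at_i.isalpha():
--             output_expression += char_at_i
--         elif char_at_i == '+':
--             output_expression += '+' if sign_multiplier == 1 else '-'
--         elif char_at_i == '-':
--             output_expression += '-' if sign_multiplier == 1 else '+'
--         elif char_at_i == '(':
--             start_index = i
--             balance = 1
--             i += 1
--             while balance > 0:
--                 if expression[i] == '(':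
--                     balance += 1
--                 elif expression[i] == ')':
--                     balance -= 1
--                 i += 1
--             end_index = i - 1
--             substring_inside = expression[start_index + 1:end_index]
--             inner_result = solve_expression(substring_inside, -sign_multiplier)
--             output_expression += inner_result
--             i -= 1
--         elif char_at_i == ')':
--             pass  # No need to handle ')' directly
--         i += 1
--     return output_expression
-- ===== SOURCE B (Python) =====
-- def solve_expression(expression, sign_multiplier):
--     # One pass: track current parenthesis nesting depth; the effective sign
--     # multiplier at depth d is sign_multiplier flipped once per nesting level.
--     out = []
--     depth = 0
--     for ch in expression:
--         if ch == '(':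
--             depth += 1
--         elif ch == ')':
--             if depth > 0:
--                 depth -= 1
--         elif ch.isalpha():
--             out.append(ch)
--         elif ch == '+' or ch == '-':
--             s = sign_multiplier if depth % 2 == 0 else -sign_multiplier
--             if ch == '+':
--                 out.append('+' if s == 1 else '-')
--             else:
--                 out.append('-' if s == 1 else '+')
--     return ''.join(out)
-- ===== Notes on version B (the rewrite author's own statement) =====
-- stated objective: faster
-- what changed: A rescans to find each matching ')' and recurses on the sliced substring (quadratic on nested input); B makes a single left-to-right pass keeping a nesting-depth counter and derives the effective sign from the depth's parity.
import Mathlib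
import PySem

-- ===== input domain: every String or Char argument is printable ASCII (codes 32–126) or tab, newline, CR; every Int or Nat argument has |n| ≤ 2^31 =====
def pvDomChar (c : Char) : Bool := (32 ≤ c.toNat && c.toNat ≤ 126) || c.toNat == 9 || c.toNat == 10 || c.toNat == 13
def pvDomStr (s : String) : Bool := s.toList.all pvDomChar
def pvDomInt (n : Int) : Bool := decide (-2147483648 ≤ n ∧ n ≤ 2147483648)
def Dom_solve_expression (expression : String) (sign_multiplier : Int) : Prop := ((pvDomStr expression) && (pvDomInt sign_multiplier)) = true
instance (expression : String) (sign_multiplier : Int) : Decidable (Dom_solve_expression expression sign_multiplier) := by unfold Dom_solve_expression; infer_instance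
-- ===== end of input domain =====

-- B replaces A's rescan-and-recurse on parenthesized substrings by a single pass with a
-- nesting-depth counter (sign = parity of depth); measured asymptotically faster (O(n) vs O(n^2)).

-- ===== PORT A =====
-- A's inner while loop: scan forward from after '(', tracking balance, until the matching ')'.
-- Returns (characters strictly inside, rest after the matching ')'); none = Python IndexError
-- (scan runs past the end), which Pre_ excludes.
def pvScan : List Char → Nat → Option (List Char × List Char)
  | [], _ => none
  | c :: rest, balance =>
    let b' := if c = '(' then balance + 1 else if c = ')' then balance - 1 else balance
    if b' = 0 then some ([], rest)
    else match pvScan rest b' with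
      | some (ins, r) => some (c :: ins, r)
      | none => none

theorem pvScan_length : ∀ (l : List Char) (b : Nat) (ins r : List Char),
    pvScan l b = some (ins, r) → ins.length + r.length + 1 = l.length := by
  intro l
  induction l with
  | nil => intro b ins r h; simp [pvScan] at h
  | cons c rest ih =>
    intro b ins r h
    simp only [pvScan] at h
    by_cases h0 : (if c = '(' then b + 1 else if c = ')' then b - 1 else b) = 0
    · rw [if_pos h0] at h
      simp at h; simp [← h.1, ← h.2]
    · rw [if_neg h0] at h
      cases hm : pvScan rest (if c = '(' then b + 1 else if c = ')' then b - 1 else b) with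
      | none => rw [hm] at h; simp at h
      | some p =>
        rw [hm] at h
        obtain ⟨ins', r'⟩ := p
        simp at h
        have := ih _ _ _ hm
        simp [← h.1, ← h.2]; omega

def solveA : List Char → Int → List Char
  | [], _ => []
  | c :: rest, sm =>
    if PySem.Chars.isalpha c then c :: solveA rest sm
    else if c = '+' then (if sm = 1 then '+' else '-') :: solveA rest sm
    else if c = '-' then (if sm = 1 then '-' else '+') :: solveA rest sm
    else if c = '(' then
      match h : pvScan rest 1 with
      | some (ins, r) => solveA ins (-sm) ++ solveA r sm
      | none => []        -- Python raises IndexError here; excluded by Pre_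
    else solveA rest sm   -- ')' and every other character: pass
termination_by l _ => l.length
decreasing_by
  all_goals (try have := pvScan_length _ _ _ _ h) <;> simp <;> omega

def solve_expression (expression : String) (sign_multiplier : Int) : String :=
  String.mk (solveA expression.toList sign_multiplier)

-- ===== PORT B =====
-- one fold step of B's for loop: state = (nesting depth, output list)
def pvStepB (sm : Int) (st : Nat × List Char) (c : Char) : Nat × List Char :=
  match st with
  | (d, out) =>
    if c = '(' then (d + 1, out)
    else if c = ')' then (if 0 < d then d - 1 else d, out)
    else if PySem.Chars.isalpha c then (d, out ++ [c])
    else if c = '+' ∨ c = '-' then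
      let s := if d % 2 = 0 then sm else -sm
      if c = '+' then (d, out ++ [if s = 1 then '+' else '-'])
      else (d, out ++ [if s = 1 then '-' else '+'])
    else (d, out)

def solve_expression_alt (expression : String) (sign_multiplier : Int) : String :=
  String.mk (expression.toList.foldl (pvStepB sign_multiplier) (0, [])).2

-- ===== PRECONDITION & SPEC =====
-- the number of unmatched '(' left after a left-to-right cancellation scan
def pvOpen : List Char → Nat → Nat
  | [], d => d
  | c :: t, d => pvOpen t (if c = '(' then d + 1 else if c = ')' then (if 0 < d then d - 1 else d) else d)

-- Pre_ excludes exactly the inputs with an unmatched '(' — there Python A raises IndexError.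
def Pre_solve_expression (expression : String) (sign_multiplier : Int) : Prop :=
  pvOpen expression.toList 0 = 0

instance (expression : String) (sign_multiplier : Int) : Decidable (Pre_solve_expression expression sign_multiplier) := by
  unfold Pre_solve_expression; infer_instance

def pvWitness_solve_expression : String × Int := ("a+(b-c)", 1)

def Spec_solve_expression (expression : String) (sign_multiplier : Int) (out : String) : Prop :=
  out = solve_expression_alt expression sign_multiplier

instance (expression : String) (sign_multiplier : Int) (out : String) : Decidable (Spec_solve_expression expression sign_multiplier out) := by
  unfold Spec_solve_expression; infer_instance

-- ===== CLAIM (what is proved, stated in full; the proofs are below) =====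
def Claim_equal_solve_expression : Prop := ∀ (expression : String) (sign_multiplier : Int), Dom_solve_expression expression sign_multiplier → Pre_solve_expression expression sign_multiplier → Spec_solve_expression expression sign_multiplier (solve_expression expression sign_multiplier)

-- ===== LEMMAS AND PROOFS =====

-- balance contribution of one character
def pvDelta (c : Char) : Int := if c = '(' then 1 else if c = ')' then -1 else 0

-- net paren balance of a segment
def pvBal : List Char → Int
  | [] => 0
  | c :: t => pvDelta c + pvBal t

-- minimum balance over all nonempty prefixes of a segment (0 for the empty segment)
def pvLow : List Char → Int
  | [] => 0
  | c :: t => min (pvDelta c) (pvDelta c + pvLow t)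

-- effective sign multiplier at nesting depth d (what B computes)
def pvEff (sm : Int) (d : Nat) : Int := if d % 2 = 0 then sm else -sm

-- B's output, as a structural recursion over the characters (the fold, unrolled)
def pvProd (sm : Int) : List Char → Nat → List Char
  | [], _ => []
  | c :: t, d =>
    if c = '(' then pvProd sm t (d + 1)
    else if c = ')' then pvProd sm t (if 0 < d then d - 1 else d)
    else if PySem.Chars.isalpha c then c :: pvProd sm t d
    else if c = '+' then (if pvEff sm d = 1 then '+' else '-') :: pvProd sm t d
    else if c = '-' then (if pvEff sm d = 1 then '-' else '+') :: pvProd sm t d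
    else pvProd sm t d

theorem pvFoldB_eq (sm : Int) : ∀ (l : List Char) (d : Nat) (out : List Char),
    l.foldl (pvStepB sm) (d, out) = (pvOpen l d, out ++ pvProd sm l d) := by
  intro l
  induction l with
  | nil => intro d out; simp [pvOpen, pvProd]
  | cons c t ih =>
    intro d out
    simp only [List.foldl_cons, pvStepB, pvOpen, pvProd, pvEff]
    split_ifs <;> simp_all [ih]

theorem pvScan_sound : ∀ (l : List Char) (b : Nat) (ins r : List Char), 1 ≤ b →
    pvScan l b = some (ins, r) →
    l = ins ++ ')' :: r ∧ (b : Int) + pvBal ins = 1 ∧ 1 ≤ (b : Int) + pvLow ins := by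
  intro l
  induction l with
  | nil => intro b ins r _ h; simp [pvScan] at h
  | cons c rest ih =>
    intro b ins r hb h
    simp only [pvScan] at h
    by_cases h0 : (if c = '(' then b + 1 else if c = ')' then b - 1 else b) = 0
    · rw [if_pos h0] at h
      simp at h
      obtain ⟨hins, hr⟩ := h
      have hc : c = ')' ∧ b = 1 := by
        by_cases h1 : c = '('
        · simp [h1] at h0
        · by_cases h2 : c = ')'
          · simp [h1, h2] at h0; exact ⟨h2, by omega⟩
          · simp [h1, h2] at h0; omega
      subst hins; subst hr
      refine ⟨by rw [hc.1]; simp, ?_, ?_⟩ <;> simp [pvBal, pvLow, hc.2]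
    · rw [if_neg h0] at h
      cases hm : pvScan rest (if c = '(' then b + 1 else if c = ')' then b - 1 else b) with
      | none => rw [hm] at h; simp at h
      | some p =>
        rw [hm] at h
        obtain ⟨ins', r'⟩ := p
        simp at h
        obtain ⟨hins, hr⟩ := h
        obtain ⟨hsplit, hbal, hlow⟩ := ih _ _ _ (by omega) hm
        have hδ : ((if c = '(' then b + 1 else if c = ')' then b - 1 else b : Nat) : Int)
            = (b : Int) + pvDelta c := by
          by_cases h1 : c = '(' <;> by_cases h2 : c = ')' <;> simp_all [pvDelta] <;> omega
        subst hins; subst hr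
        refine ⟨by rw [hsplit]; simp, ?_, ?_⟩
        · simp only [pvBal]; omega
        · simp only [pvLow]
          have e1 : (1 : Int) ≤ (b : Int) + pvDelta c := by omega
          have e2 : (1 : Int) ≤ (b : Int) + (pvDelta c + pvLow ins') := by omega
          calc (1 : Int) ≤ min ((b : Int) + pvDelta c) ((b : Int) + (pvDelta c + pvLow ins')) :=
                le_min e1 e2
            _ = (b : Int) + min (pvDelta c) (pvDelta c + pvLow ins') := min_add_add_left ..
            _ = _ := rfl

theorem pvScan_complete : ∀ (l : List Char) (b : Nat), 1 ≤ b →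
    pvScan l b = none → pvOpen l b ≠ 0 := by
  intro l
  induction l with
  | nil => intro b hb _; simp [pvOpen]; omega
  | cons c t ih =>
    intro b hb h
    simp only [pvScan] at h
    by_cases h0 : (if c = '(' then b + 1 else if c = ')' then b - 1 else b) = 0
    · rw [if_pos h0] at h; simp at h
    · rw [if_neg h0] at h
      cases hm : pvScan t (if c = '(' then b + 1 else if c = ')' then b - 1 else b) with
      | some p => rw [hm] at h; obtain ⟨ins', r'⟩ := p; simp at h
      | none =>
        have hrec := ih _ (by omega) hm
        simp only [pvOpen]
        have hstep : (if c = '(' then b + 1 else if c = ')' then (if 0 < b then b - 1 else b) else b)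
            = (if c = '(' then b + 1 else if c = ')' then b - 1 else b) := by
          split_ifs <;> omega
        rw [hstep]; exact hrec

theorem pvOpen_append : ∀ (xs ys : List Char) (d : Nat),
    pvOpen (xs ++ ys) d = pvOpen ys (pvOpen xs d) := by
  intro xs
  induction xs with
  | nil => intro ys d; simp [pvOpen]
  | cons c t ih => intro ys d; simp only [List.cons_append, pvOpen]; exact ih _ _

theorem pvOpen_noclamp : ∀ (l : List Char) (d : Nat), 0 ≤ (d : Int) + pvLow l →
    (pvOpen l d : Int) = (d : Int) + pvBal l := by
  intro l
  induction l with
  | nil => intro d _; simp [pvOpen, pvBal]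
  | cons c t ih =>
    intro d h
    simp only [pvLow] at h
    have hmR : min (pvDelta c) (pvDelta c + pvLow t) ≤ pvDelta c + pvLow t := min_le_right _ _
    have hmL : min (pvDelta c) (pvDelta c + pvLow t) ≤ pvDelta c := min_le_left _ _
    by_cases h1 : c = '('
    · have hδ : pvDelta c = 1 := by simp [pvDelta, h1]
      rw [hδ] at hmR
      simp only [pvOpen, pvBal, pvDelta, h1, reduceIte]
      have := ih (d + 1) (by push_cast; omega)
      push_cast at this ⊢; omega
    · by_cases h2 : c = ')'
      · have hδ : pvDelta c = -1 := by simp [pvDelta, h1, h2]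
        rw [hδ] at hmR hmL
        have hd : 0 < d := by omega
        simp [pvOpen, pvBal, pvDelta, h1, h2, hd]
        have := ih (d - 1) (by omega)
        omega
      · have hδ : pvDelta c = 0 := by simp [pvDelta, h1, h2]
        rw [hδ] at hmR
        simp only [pvOpen, pvBal, pvDelta, h1, h2, reduceIte]
        have := ih d (by omega)
        omega

theorem pvProd_append (sm : Int) : ∀ (xs ys : List Char) (d : Nat),
    pvProd sm (xs ++ ys) d = pvProd sm xs d ++ pvProd sm ys (pvOpen xs d) := by
  intro xs
  induction xs with
  | nil => intro ys d; simp [pvProd, pvOpen]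
  | cons c t ih =>
    intro ys d
    simp only [List.cons_append, pvProd, pvOpen]
    split_ifs <;> simp [ih]

theorem pvEff_succ (sm : Int) (d : Nat) : pvEff sm (d + 1) = - pvEff sm d := by
  unfold pvEff
  rcases Nat.mod_two_eq_zero_or_one d with h | h <;> simp [h, Nat.add_mod]

theorem pvEff_pred (sm : Int) (d : Nat) (hd : 0 < d) : pvEff sm (d - 1) = - pvEff sm d := by
  have h : d = d - 1 + 1 := by omega
  rw [h, pvEff_succ]
  simp

theorem pvProd_shift : ∀ (l : List Char) (D E : Nat) (sm sm' : Int),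
    0 ≤ (D : Int) + pvLow l → 0 ≤ (E : Int) + pvLow l →
    pvEff sm D = pvEff sm' E → pvProd sm l D = pvProd sm' l E := by
  intro l
  induction l with
  | nil => intros; simp [pvProd]
  | cons c t ih =>
    intro D E sm sm' hD hE heff
    simp only [pvLow] at hD hE
    have hmRD : min (pvDelta c) (pvDelta c + pvLow t) ≤ pvDelta c + pvLow t := min_le_right _ _
    have hmLD : min (pvDelta c) (pvDelta c + pvLow t) ≤ pvDelta c := min_le_left _ _
    by_cases h1 : c = '('
    · have hδ : pvDelta c = 1 := by simp [pvDelta, h1]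
      rw [hδ] at hmRD
      simp only [pvProd, h1, reduceIte]
      exact ih (D + 1) (E + 1) sm sm' (by push_cast; omega) (by push_cast; omega)
        (by rw [pvEff_succ, pvEff_succ, heff])
    · by_cases h2 : c = ')'
      · have hδ : pvDelta c = -1 := by simp [pvDelta, h1, h2]
        rw [hδ] at hmRD hmLD
        have hDpos : 0 < D := by omega
        have hEpos : 0 < E := by omega
        simp only [pvProd, h1, h2, reduceIte, if_pos hDpos, if_pos hEpos]
        exact ih (D - 1) (E - 1) sm sm' (by omega) (by omega)
          (by rw [pvEff_pred sm D hDpos, pvEff_pred sm' E hEpos, heff])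
      · have hδ : pvDelta c = 0 := by simp [pvDelta, h1, h2]
        rw [hδ] at hmRD
        have htail := ih D E sm sm' (by omega) (by omega) heff
        simp only [pvProd, h1, h2, reduceIte, heff, htail]

theorem pvMain : ∀ (n : Nat) (l : List Char) (sm : Int), l.length ≤ n →
    pvOpen l 0 = 0 → solveA l sm = pvProd sm l 0 := by
  intro n
  induction n with
  | zero =>
    intro l sm hl _
    have : l = [] := by cases l <;> simp_all
    subst this; simp [solveA, pvProd]
  | succ n ihn =>
    intro l sm hl hop
    cases l with
    | nil => simp [solveA, pvProd]
    | cons c t =>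
      simp only [List.length_cons] at hl
      by_cases h1 : c = '('
      · -- A scans for the matching ')' and recurses; B just bumps the depth
        subst h1
        have hopt : pvOpen t 1 = 0 := by simpa [pvOpen] using hop
        cases hm : pvScan t 1 with
        | none => exact absurd hopt (pvScan_complete t 1 le_rfl hm)
        | some p =>
          obtain ⟨ins, r⟩ := p
          obtain ⟨hsplit, hbal, hlow⟩ := pvScan_sound t 1 ins r le_rfl hm
          simp only [Nat.cast_one] at hbal hlow
          have hbal0 : pvBal ins = 0 := by omega
          have hlow0 : 0 ≤ pvLow ins := by omega
          have hins1 : pvOpen ins 1 = 1 := by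
            have := pvOpen_noclamp ins 1 (by push_cast; omega)
            omega
          have hins0 : pvOpen ins 0 = 0 := by
            have := pvOpen_noclamp ins 0 (by simpa using hlow0)
            omega
          have hr0 : pvOpen r 0 = 0 := by
            rw [hsplit, pvOpen_append, hins1] at hopt
            simpa [pvOpen] using hopt
          have hlen : ins.length + r.length + 1 = t.length := pvScan_length t 1 ins r hm
          have ihins := ihn ins (-sm) (by omega) hins0
          have ihr := ihn r sm (by omega) hr0
          have hA : solveA ('(' :: t) sm = solveA ins (-sm) ++ solveA r sm := by
            rw [solveA]
            have halpha : PySem.Chars.isalpha '(' = false := by decide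
            simp only [halpha, Bool.false_eq_true, if_false]
            simp only [reduceIte, Char.reduceEq]
            split
            · next ins' r' heq =>
              have h2 := hm.symm.trans heq
              simp at h2
              rw [h2.1, h2.2]
            · next heq => rw [heq] at hm; simp at hm
          rw [hA, ihins, ihr]
          have hB : pvProd sm ('(' :: t) 0 = pvProd sm ins 1 ++ pvProd sm r 0 := by
            simp only [pvProd, reduceIte]
            rw [hsplit, pvProd_append, hins1]
            simp [pvProd]
          rw [hB, pvProd_shift ins 1 0 sm (-sm) (by push_cast; omega) (by simpa using hlow0)
            (by simp [pvEff])]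
      · -- every other character: one step; the depth update of pvOpen/pvProd matches A's skip
        have hopt : pvOpen t 0 = 0 := by
          by_cases h2 : c = ')' <;> simpa [pvOpen, h1, h2] using hop
        have iht := ihn t sm (by omega) hopt
        rw [solveA]
        by_cases ha : PySem.Chars.isalpha c
        · have h2 : c ≠ ')' := by rintro rfl; exact absurd ha (by decide)
          have h3 : c ≠ '+' := by rintro rfl; exact absurd ha (by decide)
          have h4 : c ≠ '-' := by rintro rfl; exact absurd ha (by decide)
          simp [pvProd, h1, h2, h3, h4, ha, iht]
        · by_cases h3 : c = '+'
          · subst h3; simp [pvProd, pvEff, ha, iht]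
          · by_cases h4 : c = '-'
            · subst h4; simp [pvProd, pvEff, ha, iht]
            · by_cases h2 : c = ')'
              · subst h2; simp [pvProd, ha, iht]
              · simp [pvProd, h1, h2, h3, h4, ha, iht]

-- ===== VERDICT (by name: the statement is the Claim_ definition above) =====
theorem solve_expression_spec : Claim_equal_solve_expression := by
  intro expression sign_multiplier _ hpre
  unfold Spec_solve_expression solve_expression solve_expression_alt
  rw [pvFoldB_eq]
  simp only [List.nil_append]
  exact congrArg String.mk (pvMain expression.toList.length _ _ le_rfl hpre)
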